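-- pv_equiv track=rewrite | github.com/dl1rich/api-security-tester | backend/src/reporting/report_generator.py | _get_remediation_priorities
-- ===== SOURCE A (Python) =====
-- from typing import Dict, List, Optional, Any
--
-- def _get_remediation_priorities(vulnerabilities: List[Dict]) -> List[str]:
--     """Get prioritized remediation recommendations."""
--     priorities = []
--
--     critical_vulns = [v for v in vulnerabilities if v.get("severity") == "critical"]
--     high_vulns = [v for v in vulnerabilities if v.get("severity") == "high"]
--
--     if critical_vulns:
--         priorities.append("Immediately address all critical severity vulnerabilities")
--
--     if high_vulns:
--         priorities.append("Address high severity vulnerabilities within 30 days")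
--
--     if len(vulnerabilities) > 10:
--         priorities.append("Implement security code review process to prevent future issues")
--
--     priorities.append("Establish regular security testing schedule")
--
--     return priorities
-- ===== SOURCE B (Python) =====
-- def _get_remediation_priorities(vulnerabilities):
--     """Get prioritized remediation recommendations.
--
--     Single early-exit index scan for the two severity flags, then a
--     declarative rule table selects the messages (no list mutation).
--     """
--     crit = high = False
--     i = 0
--     while i < len(vulnerabilities) and not (crit and high):
--         s = vulnerabilities[i].get("severity")
--         crit = crit or s == "critical"
--         high = high or s == "high"
--         i += 1
--
--     rules = [
--         (crit, "Immediately address all critical severity vulnerabilities"),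
--         (high, "Address high severity vulnerabilities within 30 days"),
--         (len(vulnerabilities) > 10,
--          "Implement security code review process to prevent future issues"),
--         (True, "Establish regular security testing schedule"),
--     ]
--     return [msg for cond, msg in rules if cond]
-- ===== Notes on version B (the rewrite author's own statement) =====
-- stated objective: alternative
-- what changed: Replaces A's two full filter-comprehension passes and sequential conditional appends by a single index-driven scan that stops as soon as both a critical and a high severity have been seen (boolean flags, no intermediate lists), and selects the output messages by filtering a declarative (condition, message) rule table.
import Mathlib
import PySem

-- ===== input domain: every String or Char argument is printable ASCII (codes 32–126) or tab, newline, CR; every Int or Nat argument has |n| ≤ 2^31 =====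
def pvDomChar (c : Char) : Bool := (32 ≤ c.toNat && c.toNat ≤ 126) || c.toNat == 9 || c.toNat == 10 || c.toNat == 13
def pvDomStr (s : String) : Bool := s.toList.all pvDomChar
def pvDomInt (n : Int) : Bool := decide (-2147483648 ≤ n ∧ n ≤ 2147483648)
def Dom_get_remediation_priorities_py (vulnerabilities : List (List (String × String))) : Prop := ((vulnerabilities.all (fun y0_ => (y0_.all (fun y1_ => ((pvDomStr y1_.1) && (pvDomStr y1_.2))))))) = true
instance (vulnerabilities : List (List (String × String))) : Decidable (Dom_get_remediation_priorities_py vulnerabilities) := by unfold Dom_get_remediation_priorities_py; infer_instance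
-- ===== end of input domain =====

-- B replaces A's two filter comprehensions and sequential appends by one early-exiting flag scan
-- plus a declarative rule table (objective: alternative; return value only, no mutation involved).

-- v.get("severity"): first-match lookup in the association list (Python dict)
def sevGet (v : List (String × String)) : Option String := (PySem.Dict.mk v).get? "severity"

-- ===== PORT A =====
def get_remediation_priorities_py (vulnerabilities : List (List (String × String))) : List String :=
  let priorities : List String := []
  let critical_vulns := vulnerabilities.filter (fun v => sevGet v == some "critical")
  let high_vulns := vulnerabilities.filter (fun v => sevGet v == some "high")
  let priorities := if critical_vulns ≠ [] then
      priorities ++ ["Immediately address all critical severity vulnerabilities"] else priorities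
  let priorities := if high_vulns ≠ [] then
      priorities ++ ["Address high severity vulnerabilities within 30 days"] else priorities
  let priorities := if (vulnerabilities.length : Int) > 10 then
      priorities ++ ["Implement security code review process to prevent future issues"] else priorities
  priorities ++ ["Establish regular security testing schedule"]

-- ===== PORT B =====
-- Source B's while-loop: advance through the remaining suffix with the two flags, stopping early
-- once both flags are set (the index-based loop is transcribed as recursion on the suffix).
def pvScan : List (List (String × String)) → Bool → Bool → Bool × Bool
  | [], crit, high => (crit, high)
  | v :: rest, crit, high =>
      if crit && high then (crit, high)
      else
        let s := sevGet v
        pvScan rest (crit || s == some "critical") (high || s == some "high")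

def get_remediation_priorities_py_alt (vulnerabilities : List (List (String × String))) : List String :=
  let f := pvScan vulnerabilities false false
  let rules : List (Bool × String) :=
    [(f.1, "Immediately address all critical severity vulnerabilities"),
     (f.2, "Address high severity vulnerabilities within 30 days"),
     (decide ((vulnerabilities.length : Int) > 10), "Implement security code review process to prevent future issues"),
     (true, "Establish regular security testing schedule")]
  (rules.filter (fun r => r.1)).map (fun r => r.2)

-- ===== PRECONDITION & SPEC =====
def Spec_get_remediation_priorities_py (vulnerabilities : List (List (String × String))) (out : List String) : Prop := out = get_remediation_priorities_py_alt vulnerabilities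
instance (vulnerabilities : List (List (String × String))) (out : List String) : Decidable (Spec_get_remediation_priorities_py vulnerabilities out) := by unfold Spec_get_remediation_priorities_py; infer_instance

-- ===== CLAIM (what is proved, stated in full; the proofs are below) =====
def Claim_equal_get_remediation_priorities_py : Prop := ∀ (vulnerabilities : List (List (String × String))), Dom_get_remediation_priorities_py vulnerabilities → Spec_get_remediation_priorities_py vulnerabilities (get_remediation_priorities_py vulnerabilities)

-- ===== LEMMAS AND PROOFS =====

lemma pvScan_eq (vs : List (List (String × String))) (c h : Bool) :
    pvScan vs c h = (c || vs.any (fun v => sevGet v == some "critical"),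
                     h || vs.any (fun v => sevGet v == some "high")) := by
  induction vs generalizing c h with
  | nil => simp [pvScan]
  | cons v rest ih =>
    simp only [pvScan, List.any_cons]
    by_cases hc : c = true ∧ h = true
    · obtain ⟨hc1, hc2⟩ := hc; simp [hc1, hc2]
    · have : (c && h) = false := by
        cases c <;> cases h <;> simp_all
      rw [this]
      simp only [Bool.false_eq_true, if_false, ih]
      simp [Bool.or_assoc]

lemma filter_ne_nil_iff_any {α : Type} (p : α → Bool) (xs : List α) :
    xs.filter p ≠ [] ↔ xs.any p = true := by
  rw [Ne, List.filter_eq_nil_iff, List.any_eq_true]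
  push_neg
  constructor
  · rintro ⟨x, hx, hp⟩; exact ⟨x, hx, by simpa using hp⟩
  · rintro ⟨x, hx, hp⟩; exact ⟨x, hx, by simpa using hp⟩

-- ===== VERDICT (by name: the statement is the Claim_ definition above) =====
theorem get_remediation_priorities_py_spec : Claim_equal_get_remediation_priorities_py := by
  intro vs _
  unfold Spec_get_remediation_priorities_py get_remediation_priorities_py get_remediation_priorities_py_alt
  rw [pvScan_eq]
  simp only [Bool.false_or, filter_ne_nil_iff_any]
  by_cases hc : vs.any (fun v => sevGet v == some "critical") = true <;>
  by_cases hh : vs.any (fun v => sevGet v == some "high") = true <;>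
  by_cases hn : (vs.length : Int) > 10 <;>
    simp [hc, hh, hn, List.filter, List.map]
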